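-- pv_equiv track=rewrite | github.com/vfeng2023/AI | AI/6 Genetic Algorithms/Tetris/tetris_opt.py | mask
-- ===== SOURCE A (Python) =====
-- def mask(piece,board_segment):
--     """
--     Does a piece mask returning the combined piece and boared segment
--     """
--     if len(board_segment) != len(piece):
--         return None
--     combined = ""
--     for i in range(len(piece)):
--         if piece[i] == "#" and board_segment[i] == "#":
--             return None
--         elif piece[i] == " " and board_segment[i] == " ":
--             combined += " "
--         else:
--             combined += "#"
--     return combined
-- ===== SOURCE B (Python) =====
-- def mask(piece, board_segment):
--     """
--     Does a piece mask returning the combined piece and boared segment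
--     """
--     n = len(piece)
--     if len(board_segment) != n:
--         return None
--     # encode each string as integer bitmasks: hash positions and space positions
--     hp = sp = 0
--     for i in range(n):
--         c = piece[i]
--         if c == "#":
--             hp |= 1 << i
--         elif c == " ":
--             sp |= 1 << i
--     hb = sb = 0
--     for i in range(n):
--         c = board_segment[i]
--         if c == "#":
--             hb |= 1 << i
--         elif c == " ":
--             sb |= 1 << i
--     if hp & hb:
--         return None
--     both_space = sp & sb
--     return "".join(" " if (both_space >> i) & 1 else "#" for i in range(n))
-- ===== Notes on version B (the rewrite author's own statement) =====
-- stated objective: alternative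
-- what changed: B re-encodes each string as integer bitmasks of its '#' positions and ' ' positions, detects a collision with a single bitwise AND of the hash masks, and renders the output by reading bits of the AND of the space masks, instead of A's fused per-character loop with early return and string accumulator.
import Mathlib
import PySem

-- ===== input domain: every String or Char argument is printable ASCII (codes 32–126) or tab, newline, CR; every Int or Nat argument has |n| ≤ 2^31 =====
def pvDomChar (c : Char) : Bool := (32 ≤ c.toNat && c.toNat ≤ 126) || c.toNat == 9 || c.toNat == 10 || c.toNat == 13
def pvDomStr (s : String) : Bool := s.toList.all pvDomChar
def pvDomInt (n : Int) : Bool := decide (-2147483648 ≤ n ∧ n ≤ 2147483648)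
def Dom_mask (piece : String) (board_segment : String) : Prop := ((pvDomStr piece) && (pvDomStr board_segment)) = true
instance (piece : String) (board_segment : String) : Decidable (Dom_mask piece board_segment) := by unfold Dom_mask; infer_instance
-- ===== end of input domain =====

-- ===== PORT A =====
-- B replaces A's per-character fused loop by an integer-bitmask encoding of each string
-- ('#' positions and ' ' positions), a single bitwise AND for collision, and bit reads for output.

-- A's for-loop over i in range(len(piece)); since the length guard has passed, the indexed
-- accesses piece[i]/board_segment[i] walk the two lists in lockstep; the accumulated Python
-- string is carried as a List Char and wrapped with String.ofList at the end.
def maskLoopA : List Char → List Char → List Char → Option (List Char)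
  | [], _, acc => some acc
  | _ :: _, [], acc => some acc
  | p :: ps, b :: bs, acc =>
    if p = '#' ∧ b = '#' then none
    else if p = ' ' ∧ b = ' ' then maskLoopA ps bs (acc ++ [' '])
    else maskLoopA ps bs (acc ++ ['#'])

def mask (piece : String) (board_segment : String) : Option String :=
  if board_segment.toList.length ≠ piece.toList.length then none
  else (maskLoopA piece.toList board_segment.toList []).map String.ofList

-- ===== PORT B =====
-- Source B's per-string loop building the two bitmasks (hash positions, space positions) with |=;
-- the loop over i with s[i] becomes structural recursion over the chars carrying the index i.
def buildHS : List Char → Nat → Nat → Nat → Nat × Nat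
  | [], _, h, s => (h, s)
  | c :: cs, i, h, s =>
    if c = '#' then buildHS cs (i + 1) (h ||| (1 <<< i)) s
    else if c = ' ' then buildHS cs (i + 1) h (s ||| (1 <<< i))
    else buildHS cs (i + 1) h s

def mask_alt (piece : String) (board_segment : String) : Option String :=
  let n := piece.toList.length
  if board_segment.toList.length ≠ n then none
  else
    let hs_p := buildHS piece.toList 0 0 0
    let hs_b := buildHS board_segment.toList 0 0 0
    if hs_p.1 &&& hs_b.1 ≠ 0 then none
    else
      let both_space := hs_p.2 &&& hs_b.2
      some (String.ofList ((List.range n).map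
        (fun i => if (both_space >>> i) &&& 1 = 1 then ' ' else '#')))

-- ===== PRECONDITION & SPEC =====
def Spec_mask (piece : String) (board_segment : String) (out : Option String) : Prop := out = mask_alt piece board_segment
instance (piece : String) (board_segment : String) (out : Option String) : Decidable (Spec_mask piece board_segment out) := by unfold Spec_mask; infer_instance

-- ===== CLAIM (what is proved, stated in full; the proofs are below) =====
def Claim_equal_mask : Prop := ∀ (piece : String) (board_segment : String), Dom_mask piece board_segment → Spec_mask piece board_segment (mask piece board_segment)

-- ===== LEMMAS AND PROOFS =====
lemma maskLoopA_eq (ps : List Char) : ∀ (bs acc : List Char),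
    maskLoopA ps bs acc =
      if (ps.zip bs).any (fun q => q.1 = '#' && q.2 = '#') then none
      else some (acc ++ (ps.zip bs).map (fun q => if q.1 = ' ' && q.2 = ' ' then ' ' else '#')) := by
  induction ps with
  | nil => intro bs acc; simp [maskLoopA]
  | cons p ps ih =>
    intro bs acc
    cases bs with
    | nil => simp [maskLoopA]
    | cons b bs =>
      by_cases hc : p = '#' ∧ b = '#'
      · simp [maskLoopA, hc]
      · by_cases hs : p = ' ' ∧ b = ' '
        · simp [maskLoopA, hs, ih]
        · simp [maskLoopA, hc, hs, ih]

lemma one_shiftLeft_testBit (i j : Nat) : (1 <<< i).testBit j = decide (i = j) := by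
  rw [Nat.one_shiftLeft, Nat.testBit_two_pow]

-- bit j of the accumulated masks records whether the char at absolute position j is '#' / ' '
lemma buildHS_testBit : ∀ (cs : List Char) (i h s j : Nat),
    (buildHS cs i h s).1.testBit j
      = (h.testBit j || (decide (i ≤ j) && decide (cs[j - i]? = some '#')))
    ∧ (buildHS cs i h s).2.testBit j
      = (s.testBit j || (decide (i ≤ j) && decide (cs[j - i]? = some ' '))) := by
  intro cs
  induction cs with
  | nil => intro i h s j; simp [buildHS]
  | cons c cs ih =>
    intro i h s j
    by_cases hle : i ≤ j
    · by_cases hgt : i + 1 ≤ j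
      · -- j > i : bit i contributions vanish, head char irrelevant
        have hne : i ≠ j := by omega
        have hhead : ∀ (x : Char), ((c :: cs)[j - i]? = some x) ↔ (cs[j - (i+1)]? = some x) := by
          intro x
          have h1 : j - i = (j - (i+1)) + 1 := by omega
          rw [h1]
          simp
        simp only [buildHS]
        split_ifs with hC hS
        · rcases ih (i+1) (h ||| (1 <<< i)) s j with ⟨h1, h2⟩
          rw [h1, h2, Nat.testBit_or, one_shiftLeft_testBit]
          simp [hne, hle, hgt, hhead]
        · rcases ih (i+1) h (s ||| (1 <<< i)) j with ⟨h1, h2⟩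
          rw [h1, h2, Nat.testBit_or, one_shiftLeft_testBit]
          simp [hne, hle, hgt, hhead]
        · rcases ih (i+1) h s j with ⟨h1, h2⟩
          rw [h1, h2]
          simp [hle, hgt, hhead]
      · -- j = i : the head char decides; recursive contributions vanish
        have hji : i = j := by omega
        subst hji
        have h0 : i - i = 0 := by omega
        simp only [buildHS]
        split_ifs with hC hS
        · rcases ih (i+1) (h ||| (1 <<< i)) s i with ⟨h1, h2⟩
          rw [h1, h2, Nat.testBit_or, one_shiftLeft_testBit]
          simp [hgt, hC]
        · rcases ih (i+1) h (s ||| (1 <<< i)) i with ⟨h1, h2⟩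
          rw [h1, h2, Nat.testBit_or, one_shiftLeft_testBit]
          simp [hgt, hS]
        · rcases ih (i+1) h s i with ⟨h1, h2⟩
          rw [h1, h2]
          simp [hgt, hC, hS]
    · -- j < i
      have hgt : ¬ (i + 1 ≤ j) := by omega
      simp only [buildHS]
      split_ifs with hC hS
      · rcases ih (i+1) (h ||| (1 <<< i)) s j with ⟨h1, h2⟩
        rw [h1, h2, Nat.testBit_or, one_shiftLeft_testBit]
        have : i ≠ j := by omega
        simp [hle, hgt, this]
      · rcases ih (i+1) h (s ||| (1 <<< i)) j with ⟨h1, h2⟩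
        rw [h1, h2, Nat.testBit_or, one_shiftLeft_testBit]
        have : i ≠ j := by omega
        simp [hle, hgt, this]
      · rcases ih (i+1) h s j with ⟨h1, h2⟩
        rw [h1, h2]
        simp [hle, hgt]

lemma buildHS_fst_testBit (cs : List Char) (j : Nat) :
    (buildHS cs 0 0 0).1.testBit j = decide (cs[j]? = some '#') := by
  have := (buildHS_testBit cs 0 0 0 j).1
  simpa using this

lemma buildHS_snd_testBit (cs : List Char) (j : Nat) :
    (buildHS cs 0 0 0).2.testBit j = decide (cs[j]? = some ' ') := by
  have := (buildHS_testBit cs 0 0 0 j).2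
  simpa using this

lemma exists_testBit_of_ne_zero {n : Nat} (h : n ≠ 0) : ∃ i, n.testBit i := by
  by_contra hc
  refine h (Nat.eq_of_testBit_eq fun i => ?_)
  have hi := not_exists.mp hc i
  simp only [Bool.not_eq_true] at hi
  simp [hi]

lemma shift_and_one (x j : Nat) : ((x >>> j) &&& 1 = 1) ↔ x.testBit j := by
  simp [Nat.testBit, Nat.and_one_is_mod, Nat.shiftRight_eq_div_pow]

-- collision bit test = A's zip scan for a '#'/'#' pair
lemma collision_iff (ps bs : List Char) :
    ((buildHS ps 0 0 0).1 &&& (buildHS bs 0 0 0).1 ≠ 0)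
      ↔ (ps.zip bs).any (fun q => q.1 = '#' && q.2 = '#') = true := by
  constructor
  · intro h
    obtain ⟨j, hj⟩ := exists_testBit_of_ne_zero h
    rw [Nat.testBit_and, buildHS_fst_testBit, buildHS_fst_testBit] at hj
    have hp : ps[j]? = some '#' := by
      have := Bool.and_elim_left hj; simpa using this
    have hb : bs[j]? = some '#' := by
      have := Bool.and_elim_right hj; simpa using this
    rw [List.any_eq_true]
    refine ⟨('#', '#'), ?_, by simp⟩
    rw [List.mem_iff_getElem?]
    exact ⟨j, by rw [List.getElem?_zip_eq_some]; exact ⟨hp, hb⟩⟩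
  · intro h hz
    rw [List.any_eq_true] at h
    obtain ⟨⟨p, b⟩, hmem, hpb⟩ := h
    simp only [decide_eq_true_eq, Bool.and_eq_true] at hpb
    obtain ⟨hp, hb⟩ := hpb
    subst hp; subst hb
    rw [List.mem_iff_getElem?] at hmem
    obtain ⟨j, hj⟩ := hmem
    rw [List.getElem?_zip_eq_some] at hj
    have : ((buildHS ps 0 0 0).1 &&& (buildHS bs 0 0 0).1).testBit j = true := by
      rw [Nat.testBit_and, buildHS_fst_testBit, buildHS_fst_testBit]
      simp [hj.1, hj.2]
    rw [hz] at this
    simp at this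

-- the bit-rendered output equals A's zip map (lengths equal)
lemma output_eq (ps bs : List Char) (hlen : bs.length = ps.length) :
    (List.range ps.length).map
        (fun i => if (((buildHS ps 0 0 0).2 &&& (buildHS bs 0 0 0).2) >>> i) &&& 1 = 1 then ' ' else '#')
      = (ps.zip bs).map (fun q => if q.1 = ' ' && q.2 = ' ' then ' ' else '#') := by
  apply List.ext_getElem
  · simp [hlen]
  · intro j h1 h2
    have hj : j < ps.length := by simpa using h1
    have hjb : j < bs.length := by omega
    simp only [List.getElem_map, List.getElem_range, List.getElem_zip]
    have hbit : ((((buildHS ps 0 0 0).2 &&& (buildHS bs 0 0 0).2) >>> j) &&& 1 = 1)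
        ↔ (ps[j] = ' ' ∧ bs[j] = ' ') := by
      rw [shift_and_one, Nat.testBit_and, buildHS_snd_testBit, buildHS_snd_testBit]
      simp [List.getElem?_eq_getElem hj, List.getElem?_eq_getElem hjb]
    by_cases hsp : ps[j] = ' ' ∧ bs[j] = ' '
    · rw [if_pos (hbit.mpr hsp)]
      simp [hsp.1, hsp.2]
    · rw [if_neg (fun hy => hsp (hbit.mp hy))]
      rw [Decidable.not_and_iff_not_or_not] at hsp
      rcases hsp with hx | hx <;> simp [hx]

-- ===== VERDICT (by name: the statement is the Claim_ definition above) =====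
theorem mask_spec : Claim_equal_mask := by
  intro piece board_segment _
  unfold Spec_mask mask mask_alt
  by_cases hlen : board_segment.toList.length = piece.toList.length
  · simp only [ne_eq, hlen, not_true_eq_false, if_false]
    rw [maskLoopA_eq]
    by_cases hcoll : (piece.toList.zip board_segment.toList).any (fun q => q.1 = '#' && q.2 = '#') = true
    · rw [if_pos hcoll, if_pos ((collision_iff _ _).mpr hcoll)]
      rfl
    · rw [if_neg hcoll, if_neg (fun h => hcoll ((collision_iff _ _).mp h))]
      simp only [List.nil_append, Option.map_some]
      rw [output_eq _ _ hlen]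
  · simp only [ne_eq, hlen, not_false_eq_true, if_true]
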